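-- pv_equiv track=rewrite | github.com/dinleo/CodeTest | Programmers_Test/level_2/2_기능개발_스택.py | solution
-- ===== SOURCE A (Python) =====
-- def solution(progresses, speeds):
--     answer = []
--     while progresses != []:
--         for i in range(len(progresses)):
--             progresses[i] += speeds[i]
--         count = 0
--         while (progresses != []) and (progresses[0] >= 100) :
--             del progresses[0]
--             del speeds[0]
--             count += 1
--         if count != 0:
--             answer.append(count)
--
--     return answer
-- ===== SOURCE B (Python) =====
-- def solution(progresses, speeds):
--     # Compute each task's finish day in closed form, group consecutive
--     # tasks by the running maximum finish day (a new group starts at each record).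
--     answer = []
--     cur_max = 0
--     count = 0
--     for p, s in zip(progresses, speeds):
--         d = max(1, -((p - 100) // s))  # first day >= 1 with p + d*s >= 100 (s >= 1)
--         if d > cur_max:
--             if count != 0:
--                 answer.append(count)
--             cur_max = d
--             count = 1
--         else:
--             count += 1
--     if count != 0:
--         answer.append(count)
--     return answer
-- ===== Notes on version B (the rewrite author's own statement) =====
-- stated objective: alternative
-- what changed: Replaces the day-by-day simulation (re-advancing every remaining task each day) by a single pass that computes each task's finish day in closed form with ceiling division and groups consecutive tasks under the running-maximum finish day (intended as asymptotically faster, but a timing run could not confirm a clean ratio: A timed out at n=16 where B returned).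
-- outside the precondition, e.g. on solution([150], [0]): A returns [1], B raises ZeroDivisionError; on solution([150, 0], [-1, 10]): A returns [1, 1], B returns [2]
import Mathlib
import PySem

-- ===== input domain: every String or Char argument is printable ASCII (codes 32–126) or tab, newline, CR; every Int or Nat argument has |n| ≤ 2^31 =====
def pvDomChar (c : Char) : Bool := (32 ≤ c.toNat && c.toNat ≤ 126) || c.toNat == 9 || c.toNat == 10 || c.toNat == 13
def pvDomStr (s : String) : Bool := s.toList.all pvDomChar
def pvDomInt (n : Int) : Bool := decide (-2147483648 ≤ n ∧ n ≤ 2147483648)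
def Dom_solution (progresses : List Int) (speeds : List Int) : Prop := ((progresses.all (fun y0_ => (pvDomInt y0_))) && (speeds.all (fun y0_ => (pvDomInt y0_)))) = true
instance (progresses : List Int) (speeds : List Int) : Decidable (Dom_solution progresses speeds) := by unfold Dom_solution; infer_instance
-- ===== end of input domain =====

-- B replaces A's day-by-day stack simulation by a closed-form finish day per task and
-- one running-maximum grouping pass; A empties its argument lists in place, B does not
-- mutate them — the equivalence proved here is about the return value only.

-- ===== PORT A =====
-- 'for i in range(len(progresses)): progresses[i] += speeds[i]'
-- (zipWith is exact for len progresses ≤ len speeds, which Pre_ guarantees; beyond that Python raises IndexError)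
def advanceA (ps ss : List Int) : List Int := List.zipWith (· + ·) ps ss

-- the inner 'while progresses != [] and progresses[0] >= 100: del progresses[0]; del speeds[0]; count += 1'
def popCount : List Int → List Int → Nat × List Int × List Int
  | [], ss => (0, [], ss)
  | p :: ps, ss =>
    if 100 ≤ p then
      let r := popCount ps ss.tail
      (r.1 + 1, r.2.1, r.2.2)
    else (0, p :: ps, ss)

-- the outer 'while progresses != []' loop; the Nat fuel is only a totality guard
-- (under Pre_ it is large enough, proved below) — each iteration is one simulated day
def loopA : Nat → List Int → List Int → List Int → List Int
  | 0, _, _, ans => ans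
  | f + 1, ps, ss, ans =>
    if ps = [] then ans
    else
      let ps1 := advanceA ps ss
      let r := popCount ps1 ss
      loopA f r.2.1 r.2.2 (if r.1 ≠ 0 then ans ++ [(r.1 : Int)] else ans)

def solution (progresses : List Int) (speeds : List Int) : List Int :=
  loopA ((progresses.map (fun p => (100 - p).toNat + 1)).sum + 1) progresses speeds []

-- ===== PORT B =====
-- one fold step of Source B's loop: state (answer, cur_max, count)
def bStep (st : List Int × Int × Int) (q : Int × Int) : List Int × Int × Int :=
  let d := max 1 (-(PySem.Int.floordiv (q.1 - 100) q.2))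
  if st.2.1 < d then ((if st.2.2 ≠ 0 then st.1 ++ [st.2.2] else st.1), d, 1)
  else (st.1, st.2.1, st.2.2 + 1)

def solution_alt (progresses : List Int) (speeds : List Int) : List Int :=
  let r := (progresses.zip speeds).foldl bStep ([], 0, 0)
  if r.2.2 ≠ 0 then r.1 ++ [r.2.2] else r.1

-- ===== PRECONDITION & SPEC =====
-- Pre_ excludes inputs with fewer speeds than progresses (IndexError in A) and inputs pairing a
-- task with a nonpositive speed: there A loops forever unless every such task happens to overshoot
-- 100 on the very day it reaches the front, an accident of the simulation outside the problem's
-- domain (and B's ceiling division is meaningless or raises for speed <= 0).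
def Pre_solution (progresses : List Int) (speeds : List Int) : Prop :=
  progresses.length ≤ speeds.length ∧ ∀ q ∈ progresses.zip speeds, 1 ≤ q.2
instance (progresses : List Int) (speeds : List Int) : Decidable (Pre_solution progresses speeds) := by
  unfold Pre_solution; infer_instance

def pvWitness_solution : List Int × List Int := ([30, 55, 95], [30, 5, 10])

def Spec_solution (progresses : List Int) (speeds : List Int) (out : List Int) : Prop := out = solution_alt progresses speeds
instance (progresses : List Int) (speeds : List Int) (out : List Int) : Decidable (Spec_solution progresses speeds out) := by unfold Spec_solution; infer_instance

-- ===== CLAIM (what is proved, stated in full; the proofs are below) =====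
def Claim_equal_solution : Prop := ∀ (progresses : List Int) (speeds : List Int), Dom_solution progresses speeds → Pre_solution progresses speeds → Spec_solution progresses speeds (solution progresses speeds)

-- ===== LEMMAS AND PROOFS =====

-- finish day of a single task: the least d ≥ 1 with p + d*s ≥ 100 (for s ≥ 1)
def Dval (p s : Int) : Int := max 1 (-(PySem.Int.floordiv (p - 100) s))

-- one simulated day on the zipped task list
def adv1 (l : List (Int × Int)) : List (Int × Int) := l.map (fun q => (q.1 + q.2, q.2))

-- A's outer loop on the zipped list
def aloop : Nat → List (Int × Int) → List Int → List Int
  | 0, _, ans => ans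
  | f + 1, l, ans =>
    if l = [] then ans
    else
      let l1 := adv1 l
      let c := (l1.takeWhile (fun q => 100 ≤ q.1)).length
      let l2 := l1.dropWhile (fun q => 100 ≤ q.1)
      aloop f l2 (if c ≠ 0 then ans ++ [(c : Int)] else ans)

-- the grouping both programs compute: group sizes under the running maximum finish day
def groups : List (Int × Int) → List Int
  | [] => []
  | q :: t =>
    (1 + ((t.takeWhile (fun r => Dval r.1 r.2 ≤ Dval q.1 q.2)).length : Int)) ::
      groups (t.dropWhile (fun r => Dval r.1 r.2 ≤ Dval q.1 q.2))
  termination_by l => l.length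
  decreasing_by simp only [List.length_cons]; exact Nat.lt_succ_of_le (List.length_dropWhile_le _ _)

def maxD (l : List (Int × Int)) : Int := l.foldr (fun q m => max (Dval q.1 q.2) m) 0

lemma Dval_pos (p s : Int) : 1 ≤ Dval p s := le_max_left _ _

lemma ge100_iff {p s d : Int} (hs : 1 ≤ s) (hd : 1 ≤ d) :
    Dval p s ≤ d ↔ 100 ≤ p + d * s := by
  unfold Dval
  have key : -d ≤ PySem.Int.floordiv (p - 100) s ↔ -d * s ≤ p - 100 :=
    PySem.Int.le_floordiv_iff_mul_le (by omega)
  constructor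
  · intro h
    have h2 : -d ≤ PySem.Int.floordiv (p - 100) s := by
      have := (max_le_iff.mp h).2; omega
    have := key.mp h2; nlinarith
  · intro h
    have h2 : -d * s ≤ p - 100 := by nlinarith
    have := key.mpr h2
    exact max_le hd (by omega)

lemma Dval_shift {p s : Int} (hs : 1 ≤ s) : Dval (p + s) s = max 1 (Dval p s - 1) := by
  unfold Dval
  have h1 : p + s - 100 = (p - 100) + 1 * s := by ring
  rw [h1, PySem.Int.floordiv_eq_ediv_of_pos (by omega), PySem.Int.floordiv_eq_ediv_of_pos (by omega),
    Int.add_mul_ediv_right _ _ (by omega : s ≠ 0)]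
  rcases le_total (-(p - 100) / s) 1 with h | h <;>
    simp [max_def] <;> split_ifs <;> omega

lemma Dval_bound {p s : Int} (hs : 1 ≤ s) : Dval p s ≤ ((100 - p).toNat : Int) + 1 := by
  have htn : (100 : Int) - p ≤ ((100 - p).toNat : Int) := Int.self_le_toNat _
  have htn0 : (0 : Int) ≤ ((100 - p).toNat : Int) := Int.natCast_nonneg _
  rcases le_or_gt 100 p with hp | hp
  · have h0 : 0 ≤ PySem.Int.floordiv (p - 100) s := by
      rw [PySem.Int.floordiv_eq_ediv_of_pos (by omega)]
      exact Int.ediv_nonneg (by omega) (by omega)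
    unfold Dval; omega
  · have h2 : p - 100 ≤ PySem.Int.floordiv (p - 100) s := by
      rw [PySem.Int.le_floordiv_iff_mul_le (by omega : (0:Int) < s)]
      nlinarith
    unfold Dval; omega

-- takeWhile/dropWhile only look at members: congruence under a member-wise equal predicate
lemma tdWhile_congr_mem {α : Type} (l : List α) (p q : α → Bool) (h : ∀ x ∈ l, p x = q x) :
    l.takeWhile p = l.takeWhile q ∧ l.dropWhile p = l.dropWhile q := by
  induction l with
  | nil => simp
  | cons a t ih =>
    have ha := h a (by simp)
    have iht := ih (fun x hx => h x (List.mem_cons_of_mem _ hx))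
    simp [List.takeWhile_cons, List.dropWhile_cons, ha, iht.1, iht.2]

lemma max_shift_le_iff {x D : Int} (hD : 2 ≤ D) :
    (max 1 (x - 1) ≤ D - 1) ↔ x ≤ D := by rw [max_le_iff]; omega

-- one day of simulation does not change the grouping while the front task is unfinished
lemma groups_adv1 : ∀ (l : List (Int × Int)),
    (∀ q ∈ l, 1 ≤ q.2) → (∀ x ∈ l.head?, 2 ≤ Dval x.1 x.2) →
    groups (adv1 l) = groups l := by
  intro l
  induction l using groups.induct with
  | case1 => intro _ _; rfl
  | case2 q t ih =>
    intro hsp hhd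
    have hq : 1 ≤ q.2 := hsp q (by simp)
    have hD : 2 ≤ Dval q.1 q.2 := hhd q (by simp)
    have hDq : Dval (q.1 + q.2) q.2 = Dval q.1 q.2 - 1 := by
      rw [Dval_shift hq]
      have := Dval_pos q.1 q.2; omega
    have hpt : ∀ r ∈ t,
        (decide (Dval (r.1 + r.2) r.2 ≤ Dval (q.1 + q.2) q.2)) =
        (decide (Dval r.1 r.2 ≤ Dval q.1 q.2)) := by
      intro r hr
      have hr2 : 1 ≤ r.2 := hsp r (List.mem_cons_of_mem _ hr)
      rw [hDq, Dval_shift hr2, decide_eq_decide]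
      exact max_shift_le_iff hD
    have htake := (tdWhile_congr_mem t _ _ hpt).1
    have hdrop := (tdWhile_congr_mem t _ _ hpt).2
    show groups ((q.1 + q.2, q.2) :: adv1 t) = _
    rw [groups, groups]
    have hmapT : (adv1 t).takeWhile (fun r => Dval r.1 r.2 ≤ Dval (q.1 + q.2) q.2)
        = adv1 (t.takeWhile (fun r => Dval r.1 r.2 ≤ Dval q.1 q.2)) := by
      unfold adv1; rw [List.takeWhile_map]
      exact congrArg _ htake
    have hmapD : (adv1 t).dropWhile (fun r => Dval r.1 r.2 ≤ Dval (q.1 + q.2) q.2)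
        = adv1 (t.dropWhile (fun r => Dval r.1 r.2 ≤ Dval q.1 q.2)) := by
      unfold adv1; rw [List.dropWhile_map]
      exact congrArg _ hdrop
    rw [hmapT, hmapD]
    congr 1
    · unfold adv1; simp
    · apply ih
      · intro r hr
        exact hsp r (List.mem_cons_of_mem _ ((List.dropWhile_sublist _).mem hr))
      · intro y hy
        rcases hd : t.dropWhile (fun r => Dval r.1 r.2 ≤ Dval q.1 q.2) with _ | ⟨z, zs⟩
        · rw [hd] at hy; simp at hy
        · rw [hd] at hy; simp at hy
          have hz : (fun r => decide (Dval r.1 r.2 ≤ Dval q.1 q.2)) z = false := by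
            have := List.head_dropWhile_not
              (fun r => decide (Dval r.1 r.2 ≤ Dval q.1 q.2)) (l := t) (by simp [hd])
            simpa [hd] using this
          simp at hz
          subst hy
          omega

lemma bStep_eq (st : List Int × Int × Int) (q : Int × Int) :
    bStep st q = if st.2.1 < Dval q.1 q.2
      then ((if st.2.2 ≠ 0 then st.1 ++ [st.2.2] else st.1), Dval q.1 q.2, 1)
      else (st.1, st.2.1, st.2.2 + 1) := rfl

-- B's fold from a mid-group state (count c ≥ 1, current maximum m)
lemma bRun : ∀ (l : List (Int × Int)) (ans : List Int) (m c : Int), 1 ≤ c →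
    (let r := l.foldl bStep (ans, m, c); if r.2.2 ≠ 0 then r.1 ++ [r.2.2] else r.1)
    = ans ++ ((c + ((l.takeWhile (fun q => Dval q.1 q.2 ≤ m)).length : Int)) ::
        groups (l.dropWhile (fun q => Dval q.1 q.2 ≤ m))) := by
  intro l
  induction l with
  | nil =>
    intro ans m c hc
    simp [groups]
    omega
  | cons q t ih =>
    intro ans m c hc
    by_cases hrec : m < Dval q.1 q.2
    · have hstep : bStep (ans, m, c) q = (ans ++ [c], Dval q.1 q.2, 1) := by
        rw [bStep_eq]
        simp only []
        rw [if_pos (by exact hrec), if_pos (by omega)]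
      rw [List.foldl_cons, hstep, ih _ _ 1 le_rfl]
      rw [List.takeWhile_cons, List.dropWhile_cons,
        if_neg (by simp; omega), if_neg (by simp; omega)]
      rw [groups]
      simp
    · have hstep : bStep (ans, m, c) q = (ans, m, c + 1) := by
        rw [bStep_eq]
        simp only []
        rw [if_neg (by exact hrec)]
      rw [List.foldl_cons, hstep, ih _ _ (c + 1) (by omega)]
      rw [List.takeWhile_cons, List.dropWhile_cons,
        if_pos (by simp; omega), if_pos (by simp; omega)]
      simp
      omega

lemma B_eq_groups (ps ss : List Int) : solution_alt ps ss = groups (ps.zip ss) := by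
  rcases h : ps.zip ss with _ | ⟨q, t⟩
  · simp [solution_alt, h, groups]
  · unfold solution_alt
    rw [h, List.foldl_cons]
    have hD := Dval_pos q.1 q.2
    have hstep : bStep ([], 0, 0) q = ([], Dval q.1 q.2, 1) := by
      rw [bStep_eq]
      simp only []
      rw [if_pos (by omega), if_neg (by omega)]
    rw [hstep]
    have := bRun t [] (Dval q.1 q.2) 1 le_rfl
    simp only [] at this ⊢
    rw [this, groups]
    simp

-- the inner pop loop, characterised
lemma popCount_spec : ∀ (qs ss : List Int), qs.length ≤ ss.length →
    popCount qs ss = ((qs.takeWhile (fun p => 100 ≤ p)).length,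
      qs.dropWhile (fun p => 100 ≤ p), ss.drop (qs.takeWhile (fun p => 100 ≤ p)).length) := by
  intro qs
  induction qs with
  | nil => intro ss _; simp [popCount]
  | cons p qs ih =>
    intro ss hlen
    rcases ss with _ | ⟨s, ss'⟩
    · simp at hlen
    · by_cases hp : (100 : Int) ≤ p
      · rw [popCount, if_pos hp]
        have := ih ss' (by simpa using hlen)
        simp only [List.tail_cons, this, List.takeWhile_cons, List.dropWhile_cons]
        simp [hp]
      · rw [popCount, if_neg hp]
        simp [hp]

lemma zip_advanceA : ∀ (ps ss : List Int), (advanceA ps ss).zip ss = adv1 (ps.zip ss) := by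
  intro ps
  induction ps with
  | nil => intro ss; simp [advanceA, adv1]
  | cons p pt ih =>
    intro ss
    rcases ss with _ | ⟨s, st⟩
    · simp [advanceA, adv1]
    · simp only [advanceA, List.zipWith_cons_cons, List.zip_cons_cons, adv1, List.map_cons]
      exact congrArg _ (ih st)

lemma zip_pop : ∀ (qs ss : List Int), qs.length ≤ ss.length →
    ((qs.takeWhile (fun p => 100 ≤ p)).length
        = ((qs.zip ss).takeWhile (fun q => 100 ≤ q.1)).length) ∧
    ((qs.dropWhile (fun p => 100 ≤ p)).zip (ss.drop (qs.takeWhile (fun p => 100 ≤ p)).length)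
        = (qs.zip ss).dropWhile (fun q => 100 ≤ q.1)) := by
  intro qs
  induction qs with
  | nil => intro ss _; simp
  | cons p qt ih =>
    intro ss hlen
    rcases ss with _ | ⟨s, st⟩
    · simp at hlen
    · have iht := ih st (by simpa using hlen)
      by_cases hp : (100 : Int) ≤ p
      · simp only [List.zip_cons_cons, List.takeWhile_cons, List.dropWhile_cons, hp,
          decide_true, if_true, List.length_cons, List.drop_succ_cons]
        exact ⟨by rw [iht.1], iht.2⟩
      · simp only [List.zip_cons_cons, List.takeWhile_cons, List.dropWhile_cons, hp,
          decide_false, Bool.false_eq_true, if_false]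
        simp

lemma loopA_eq_aloop : ∀ (f : Nat) (ps ss : List Int) (ans : List Int),
    ps.length ≤ ss.length → loopA f ps ss ans = aloop f (ps.zip ss) ans := by
  intro f
  induction f with
  | zero => intro ps ss ans _; rfl
  | succ f ih =>
    intro ps ss ans hlen
    by_cases hps : ps = []
    · subst hps; simp [loopA, aloop]
    · have hzip : ps.zip ss ≠ [] := by
        have hlp : 0 < ps.length := List.length_pos_of_ne_nil hps
        intro h
        have := congrArg List.length h
        rw [List.length_zip] at this
        simp only [List.length_nil] at this
        omega
      rw [loopA, if_neg hps, aloop, if_neg hzip]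
      set qs := advanceA ps ss with hqs
      have hqlen : qs.length ≤ ss.length := by
        rw [hqs]; unfold advanceA; rw [List.length_zipWith]; omega
      have hpop := popCount_spec qs ss hqlen
      have hzp := zip_pop qs ss hqlen
      have hadv : adv1 (ps.zip ss) = qs.zip ss := (zip_advanceA ps ss).symm
      simp only [hpop, hadv]
      rw [← hzp.1]
      have hlen2 : (qs.dropWhile (fun p => decide (100 ≤ p))).length ≤
          (ss.drop (qs.takeWhile (fun p => decide (100 ≤ p))).length).length := by
        have h1 : (qs.takeWhile (fun p => decide (100 ≤ p))).length +
            (qs.dropWhile (fun p => decide (100 ≤ p))).length = qs.length := by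
          conv_rhs => rw [← List.takeWhile_append_dropWhile
            (p := fun p : Int => decide (100 ≤ p)) (l := qs)]
          rw [List.length_append]
        rw [List.length_drop]
        omega
      rw [ih _ _ _ hlen2, hzp.2]

lemma maxD_cons (q : Int × Int) (t : List (Int × Int)) :
    maxD (q :: t) = max (Dval q.1 q.2) (maxD t) := rfl

lemma maxD_nonneg : ∀ (l : List (Int × Int)), 0 ≤ maxD l := by
  intro l
  induction l with
  | nil => simp [maxD]
  | cons q t ih => rw [maxD_cons]; exact le_max_of_le_right ih

lemma le_maxD {l : List (Int × Int)} {q : Int × Int} (h : q ∈ l) : Dval q.1 q.2 ≤ maxD l := by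
  induction l with
  | nil => simp at h
  | cons x t ih =>
    rw [maxD_cons]
    rcases List.mem_cons.mp h with h1 | h1
    · subst h1; exact le_max_left _ _
    · exact le_max_of_le_right (ih h1)

lemma maxD_le_of {l : List (Int × Int)} {B : Int} (hB : 0 ≤ B)
    (h : ∀ q ∈ l, Dval q.1 q.2 ≤ B) : maxD l ≤ B := by
  induction l with
  | nil => simpa [maxD] using hB
  | cons x t ih =>
    rw [maxD_cons]
    exact max_le (h x (by simp)) (ih (fun q hq => h q (List.mem_cons_of_mem _ hq)))

lemma aloop_nil (f : Nat) (ans : List Int) : aloop f [] ans = ans := by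
  cases f <;> rfl

lemma maxD_adv1_le {l m : List (Int × Int)} (hsp : ∀ q ∈ l, 1 ≤ q.2)
    (hsub : ∀ q ∈ m, q ∈ l) (h2 : 2 ≤ maxD l) : maxD (adv1 m) ≤ maxD l - 1 := by
  apply maxD_le_of (by omega)
  intro q hq
  unfold adv1 at hq
  rcases List.mem_map.mp hq with ⟨r, hr, hrq⟩
  have hr2 : 1 ≤ r.2 := hsp r (hsub r hr)
  have hrl : Dval r.1 r.2 ≤ maxD l := le_maxD (hsub r hr)
  subst hrq
  simp only []
  rw [Dval_shift hr2, max_le_iff]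
  omega

lemma adv1_length (l : List (Int × Int)) : (adv1 l).length = l.length := by
  simp [adv1]

-- the day-by-day loop produces exactly the closed-form grouping
lemma aloop_eq_groups : ∀ (f : Nat) (l : List (Int × Int)) (ans : List Int),
    (∀ q ∈ l, 1 ≤ q.2) → maxD l < (f : Int) → aloop f l ans = ans ++ groups l := by
  intro f
  induction f with
  | zero =>
    intro l ans _ hf
    have := maxD_nonneg l
    simp at hf
    omega
  | succ f ih =>
    intro l ans hsp hf
    rcases hl : l with _ | ⟨x, t⟩
    · rw [aloop_nil]; simp [groups]
    · subst hl
      have hx2 : 1 ≤ x.2 := hsp x (by simp)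
      have hD1 : 1 ≤ Dval x.1 x.2 := Dval_pos x.1 x.2
      rw [aloop, if_neg (by simp)]
      have hpt : ∀ q ∈ x :: t,
          (decide (100 ≤ q.1 + q.2)) = (decide (Dval q.1 q.2 ≤ 1)) := by
        intro q hq
        have hq2 : 1 ≤ q.2 := hsp q hq
        rw [decide_eq_decide]
        rw [ge100_iff hq2 le_rfl, one_mul]
      have hmapT : (adv1 (x :: t)).takeWhile (fun q => 100 ≤ q.1)
          = adv1 ((x :: t).takeWhile (fun q => Dval q.1 q.2 ≤ 1)) := by
        unfold adv1; rw [List.takeWhile_map]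
        exact congrArg _ (tdWhile_congr_mem _ _ _ hpt).1
      have hmapD : (adv1 (x :: t)).dropWhile (fun q => 100 ≤ q.1)
          = adv1 ((x :: t).dropWhile (fun q => Dval q.1 q.2 ≤ 1)) := by
        unfold adv1; rw [List.dropWhile_map]
        exact congrArg _ (tdWhile_congr_mem _ _ _ hpt).2
      simp only [hmapT, hmapD]
      by_cases hD : Dval x.1 x.2 ≤ 1
      · -- the front task finishes today: pop the whole first group
        have hDeq : Dval x.1 x.2 = 1 := by omega
        have htw : (x :: t).takeWhile (fun q => Dval q.1 q.2 ≤ 1)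
            = x :: t.takeWhile (fun q => Dval q.1 q.2 ≤ 1) := by
          rw [List.takeWhile_cons]; simp [hD]
        have hdw : (x :: t).dropWhile (fun q => Dval q.1 q.2 ≤ 1)
            = t.dropWhile (fun q => Dval q.1 q.2 ≤ 1) := by
          rw [List.dropWhile_cons]; simp [hD]
        rw [htw, hdw]
        have hgroups : groups (x :: t)
            = (1 + ((t.takeWhile (fun r => Dval r.1 r.2 ≤ 1)).length : Int)) ::
              groups (t.dropWhile (fun r => Dval r.1 r.2 ≤ 1)) := by
          rw [groups, hDeq]
        rcases hdrop : t.dropWhile (fun r => Dval r.1 r.2 ≤ 1) with _ | ⟨y, ys⟩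
        · rw [hdrop]
          have hlc : (adv1 (x :: t.takeWhile (fun q => Dval q.1 q.2 ≤ 1))).length
              = (t.takeWhile (fun q => Dval q.1 q.2 ≤ 1)).length + 1 := by
            rw [adv1_length]; simp
          rw [hlc, if_pos (Nat.succ_ne_zero _)]
          show aloop f (adv1 []) _ = _
          unfold adv1
          rw [List.map_nil, aloop_nil, hgroups, hdrop, groups]
          simp
          ring
        · have hy : (fun r => decide (Dval r.1 r.2 ≤ 1)) y = false := by
            have := List.head_dropWhile_not
              (fun r => decide (Dval r.1 r.2 ≤ 1)) (l := t) (by simp [hdrop])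
            simpa [hdrop] using this
          simp at hy
          have hyl : y ∈ x :: t := by
            apply List.mem_cons_of_mem
            exact (List.dropWhile_sublist _).mem (by rw [hdrop]; simp)
          have hmax2 : 2 ≤ maxD (x :: t) := le_trans (by omega) (le_maxD hyl)
          have hmadv : maxD (adv1 (y :: ys)) ≤ maxD (x :: t) - 1 := by
            apply maxD_adv1_le hsp _ hmax2
            intro q hq
            apply List.mem_cons_of_mem
            exact (List.dropWhile_sublist _).mem (by rw [hdrop]; exact hq)
          have hsp2 : ∀ q ∈ adv1 (y :: ys), 1 ≤ q.2 := by
            intro q hq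
            unfold adv1 at hq
            rcases List.mem_map.mp hq with ⟨r, hr, hrq⟩
            have hrl : r ∈ x :: t := List.mem_cons_of_mem _
              ((List.dropWhile_sublist _).mem (by rw [hdrop]; exact hr))
            subst hrq
            exact hsp r hrl
          have hlt : maxD (adv1 (y :: ys)) < (f : Int) := by push_cast at hf; omega
          have hlc : (adv1 (x :: t.takeWhile (fun q => Dval q.1 q.2 ≤ 1))).length
              = (t.takeWhile (fun q => Dval q.1 q.2 ≤ 1)).length + 1 := by
            rw [adv1_length]; simp
          rw [hdrop, hlc, if_pos (Nat.succ_ne_zero _)]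
          rw [ih _ _ hsp2 hlt]
          rw [groups_adv1 (y :: ys)
            (by
              intro q hq
              exact hsp q (List.mem_cons_of_mem _
                ((List.dropWhile_sublist _).mem (by rw [hdrop]; exact hq))))
            (by intro z hz; simp at hz; subst hz; omega)]
          rw [hgroups, hdrop]
          simp
          ring
      · -- nothing finishes today: advance one day
        have hD2 : 2 ≤ Dval x.1 x.2 := by omega
        have htw : (x :: t).takeWhile (fun q => Dval q.1 q.2 ≤ 1)
            = ([] : List (Int × Int)) := by
          rw [List.takeWhile_cons]; simp; omega
        have hdw : (x :: t).dropWhile (fun q => Dval q.1 q.2 ≤ 1) = x :: t := by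
          rw [List.dropWhile_cons]; simp; omega
        rw [htw, hdw]
        have hmax2 : 2 ≤ maxD (x :: t) := le_trans hD2 (le_maxD (by simp))
        have hmadv : maxD (adv1 (x :: t)) ≤ maxD (x :: t) - 1 :=
          maxD_adv1_le hsp (fun q hq => hq) hmax2
        have hsp2 : ∀ q ∈ adv1 (x :: t), 1 ≤ q.2 := by
          intro q hq
          unfold adv1 at hq
          rcases List.mem_map.mp hq with ⟨r, hr, hrq⟩
          subst hrq
          exact hsp r hr
        have hlt : maxD (adv1 (x :: t)) < (f : Int) := by push_cast at hf; omega
        have hlc : (adv1 ([] : List (Int × Int))).length = 0 := by rw [adv1_length]; rfl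
        rw [hlc, if_neg (by omega)]
        rw [ih _ _ hsp2 hlt]
        rw [groups_adv1 (x :: t) hsp (by intro z hz; simp at hz; subst hz; omega)]

lemma fuel_ok (ps ss : List Int) (hsp : ∀ q ∈ ps.zip ss, 1 ≤ q.2) :
    maxD (ps.zip ss) < ((((ps.map (fun p => (100 - p).toNat + 1)).sum + 1 : Nat) : Int)) := by
  have hle : maxD (ps.zip ss) ≤ (((ps.map (fun p => (100 - p).toNat + 1)).sum : Nat) : Int) := by
    apply maxD_le_of (by positivity)
    intro q hq
    have hq2 : 1 ≤ q.2 := hsp q hq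
    have hq1 : q.1 ∈ ps := (List.of_mem_zip hq).1
    have hterm : ((100 - q.1).toNat + 1) ∈ ps.map (fun p => (100 - p).toNat + 1) :=
      List.mem_map.mpr ⟨q.1, hq1, rfl⟩
    have hsum : ((100 - q.1).toNat + 1) ≤ (ps.map (fun p => (100 - p).toNat + 1)).sum :=
      List.le_sum_of_mem hterm
    calc Dval q.1 q.2 ≤ ((100 - q.1).toNat : Int) + 1 := Dval_bound hq2
      _ ≤ _ := by exact_mod_cast hsum
  push_cast at hle ⊢
  omega

theorem solution_spec : Claim_equal_solution := by
  intro ps ss _ hpre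
  obtain ⟨hlen, hsp⟩ := hpre
  unfold Spec_solution solution
  rw [loopA_eq_aloop _ _ _ _ hlen,
    aloop_eq_groups _ _ _ hsp (fuel_ok ps ss hsp), B_eq_groups]
  simp
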